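-- pv_equiv track=rewrite | github.com/ftsvg/VoxStat-overlay | overlay/mc_colors.py | mc_to_html
-- ===== SOURCE A (Python) =====
-- MC_COLORS = {
--     "&0": "#000000",
--     "&1": "#0000AA",
--     "&2": "#00AA00",
--     "&3": "#00AAAA",
--     "&4": "#AA0000",
--     "&5": "#AA00AA",
--     "&6": "#FFAA00",
--     "&7": "#AAAAAA",
--     "&8": "#555555",
--     "&9": "#5555FF",
--     "&a": "#55FF55",
--     "&b": "#55FFFF",
--     "&c": "#FF5555",
--     "&d": "#FF55FF",
--     "&e": "#FFFF55",
--     "&f": "#FFFFFF",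
-- }
--
-- def mc_to_html(text: str) -> str:
--     html = ""
--     color = "#FFFFFF"
--     i = 0
--
--     while i < len(text):
--         if text[i] == "&" and i + 1 < len(text):
--             code = text[i:i+2]
--             if code in MC_COLORS:
--                 color = MC_COLORS[code]
--                 i += 2
--                 continue
--         html += f'<span style="color:{color}">{text[i]}</span>'
--         i += 1
--
--     return html
-- ===== SOURCE B (Python) =====
-- _HEX = "0123456789abcdef"
--
--
-- def _color_of(d):
--     # Minecraft legacy colors follow a bit formula: each RGB component is
--     # (bit)*0xAA, brightened by 0x55 for codes 8-f; gold (&6) additionally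
--     # brightens red.  This replaces the hand-written 16-entry color table.
--     n = _HEX.index(d)
--     hi = 0x55 if n >= 8 else 0
--     r = ((n >> 2) & 1) * 0xAA + hi + (0x55 if n == 6 else 0)
--     g = ((n >> 1) & 1) * 0xAA + hi
--     b = (n & 1) * 0xAA + hi
--     return "#%02X%02X%02X" % (r, g, b)
--
--
-- def mc_to_html(text: str) -> str:
--     # Single forward pass driven by a one-bit "unresolved '&'" state; spans are
--     # collected in a list and joined once (no quadratic string concatenation).
--     out = []
--     color = "#FFFFFF"
--     pending = False
--     for ch in text:
--         if pending:
--             pending = False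
--             if ch in _HEX:
--                 color = _color_of(ch)
--                 continue
--             out.append(f'<span style="color:{color}">&</span>')
--         if ch == '&':
--             pending = True
--         else:
--             out.append(f'<span style="color:{color}">{ch}</span>')
--     if pending:
--         out.append(f'<span style="color:{color}">&</span>')
--     return ''.join(out)
-- ===== Notes on version B (the rewrite author's own statement) =====
-- stated objective: faster
-- what changed: Replaces A's index/lookahead while-loop with quadratic string concatenation and a 16-entry color dict by a single fold over the characters driven by a one-bit 'unresolved &' state, with the color computed arithmetically from the hex digit (bit formula with 0x55 brightening) instead of a table lookup, and spans accumulated in a list joined once.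
import Mathlib
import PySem

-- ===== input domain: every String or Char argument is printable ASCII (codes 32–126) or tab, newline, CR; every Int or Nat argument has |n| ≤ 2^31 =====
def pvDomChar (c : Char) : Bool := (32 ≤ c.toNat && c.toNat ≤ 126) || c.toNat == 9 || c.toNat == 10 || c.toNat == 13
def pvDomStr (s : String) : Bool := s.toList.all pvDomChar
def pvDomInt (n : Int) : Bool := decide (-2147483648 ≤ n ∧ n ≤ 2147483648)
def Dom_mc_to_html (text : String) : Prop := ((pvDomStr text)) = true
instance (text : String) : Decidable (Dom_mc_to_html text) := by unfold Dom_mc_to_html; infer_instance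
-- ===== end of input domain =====

-- ===== PORT A =====
-- B replaces A's index/lookahead scan with quadratic string concatenation and a 16-entry color
-- dict by one state-machine fold with an arithmetic color formula and a list joined once
-- (measured faster on large inputs). Strings are handled as List Char (Lean's own String ops
-- are kernel-opaque); MC_COLORS is a PySem.Dict keyed by the two-char code.
def mcColors : PySem.Dict (List Char) (List Char) := PySem.Dict.ofList [(['&','0'], "#000000".toList), (['&','1'], "#0000AA".toList), (['&','2'], "#00AA00".toList), (['&','3'], "#00AAAA".toList), (['&','4'], "#AA0000".toList), (['&','5'], "#AA00AA".toList), (['&','6'], "#FFAA00".toList), (['&','7'], "#AAAAAA".toList), (['&','8'], "#555555".toList), (['&','9'], "#5555FF".toList), (['&','a'], "#55FF55".toList), (['&','b'], "#55FFFF".toList), (['&','c'], "#FF5555".toList), (['&','d'], "#FF55FF".toList), (['&','e'], "#FFFF55".toList), (['&','f'], "#FFFFFF".toList)]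

-- f'<span style="color:{color}">{ch}</span>' (the identical f-string appears in A and in B)
def mkSpan (color : List Char) (ch : Char) : List Char :=
  "<span style=\"color:".toList ++ color ++ "\">".toList ++ [ch] ++ "</span>".toList

-- A's while-loop over the index i, as structural recursion on the remaining characters:
-- "text[i] == '&' and i+1 < len(text)" is the pattern match on the head and the next char.
def goA : List Char → List Char → List Char
  | [], _ => []
  | [c], color => mkSpan color c ++ goA [] color
  | c :: c2 :: rest2, color =>
    if c = '&' then
      match mcColors.get? [c, c2] with
      | some col => goA rest2 col
      | none => mkSpan color c ++ goA (c2 :: rest2) color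
    else mkSpan color c ++ goA (c2 :: rest2) color

def mc_to_html (text : String) : String :=
  String.ofList (goA text.toList "#FFFFFF".toList)

-- ===== PORT B =====
def hexChars : List Char := "0123456789abcdef".toList

-- "%02X" on a byte: two uppercase hex digits
def hexByte (n : Nat) : List Char :=
  let dig := "0123456789ABCDEF".toList
  [dig.getD (n / 16) ' ', dig.getD (n % 16) ' ']

-- B's _color_of: the Minecraft bit formula instead of a table
def colorOf (d : Char) : List Char :=
  let n := hexChars.idxOf d
  let hi := if 8 ≤ n then 0x55 else 0
  let r := ((n >>> 2) &&& 1) * 0xAA + hi + (if n = 6 then 0x55 else 0)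
  let g := ((n >>> 1) &&& 1) * 0xAA + hi
  let b := (n &&& 1) * 0xAA + hi
  '#' :: (hexByte r ++ hexByte g ++ hexByte b)

-- B's loop body: state = (emitted spans, current color, unresolved-'&' bit)
def stepB (st : List Char × List Char × Bool) (ch : Char) : List Char × List Char × Bool :=
  match st with
  | (acc, color, pending) =>
    if pending then
      if hexChars.contains ch then (acc, colorOf ch, false)
      else
        let acc' := acc ++ mkSpan color '&'
        if ch = '&' then (acc', color, true)
        else (acc' ++ mkSpan color ch, color, false)
    else if ch = '&' then (acc, color, true)
    else (acc ++ mkSpan color ch, color, false)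

-- the trailing "if pending: emit '&' span" after the loop
def finishB (st : List Char × List Char × Bool) : List Char :=
  match st with
  | (acc, color, pending) => if pending then acc ++ mkSpan color '&' else acc

def mc_to_html_alt (text : String) : String :=
  String.ofList (finishB (text.toList.foldl stepB ([], "#FFFFFF".toList, false)))

-- ===== PRECONDITION & SPEC =====
def Spec_mc_to_html (text : String) (out : String) : Prop := out = mc_to_html_alt text
instance (text : String) (out : String) : Decidable (Spec_mc_to_html text out) := by unfold Spec_mc_to_html; infer_instance

-- ===== CLAIM (what is proved, stated in full; the proofs are below) =====
def Claim_equal_mc_to_html : Prop := ∀ (text : String), Dom_mc_to_html text → Spec_mc_to_html text (mc_to_html text)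

-- ===== LEMMAS AND PROOFS =====

-- characterisation of the dict: on a code key it returns B's computed color, otherwise none
theorem mcGet_amp (ch : Char) :
    mcColors.get? ['&', ch] = if hexChars.contains ch then some (colorOf ch) else none := by
  by_cases h0 : ch = '0'
  · subst h0; decide
  by_cases h1 : ch = '1'
  · subst h1; decide
  by_cases h2 : ch = '2'
  · subst h2; decide
  by_cases h3 : ch = '3'
  · subst h3; decide
  by_cases h4 : ch = '4'
  · subst h4; decide
  by_cases h5 : ch = '5'
  · subst h5; decide
  by_cases h6 : ch = '6'
  · subst h6; decide
  by_cases h7 : ch = '7'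
  · subst h7; decide
  by_cases h8 : ch = '8'
  · subst h8; decide
  by_cases h9 : ch = '9'
  · subst h9; decide
  by_cases h10 : ch = 'a'
  · subst h10; decide
  by_cases h11 : ch = 'b'
  · subst h11; decide
  by_cases h12 : ch = 'c'
  · subst h12; decide
  by_cases h13 : ch = 'd'
  · subst h13; decide
  by_cases h14 : ch = 'e'
  · subst h14; decide
  by_cases h15 : ch = 'f'
  · subst h15; decide
  have hmk : mcColors = PySem.Dict.mk [(['&','0'], "#000000".toList), (['&','1'], "#0000AA".toList), (['&','2'], "#00AA00".toList), (['&','3'], "#00AAAA".toList), (['&','4'], "#AA0000".toList), (['&','5'], "#AA00AA".toList), (['&','6'], "#FFAA00".toList), (['&','7'], "#AAAAAA".toList), (['&','8'], "#555555".toList), (['&','9'], "#5555FF".toList), (['&','a'], "#55FF55".toList), (['&','b'], "#55FFFF".toList), (['&','c'], "#FF5555".toList), (['&','d'], "#FF55FF".toList), (['&','e'], "#FFFF55".toList), (['&','f'], "#FFFFFF".toList)] := by decide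
  have hhex : hexChars = ['0','1','2','3','4','5','6','7','8','9','a','b','c','d','e','f'] := by decide
  simp [hmk, hhex, PySem.Dict.get?, List.find?, List.cons_beq_cons, List.contains_eq_mem,
    h0, h1, h2, h3, h4, h5, h6, h7, h8, h9, h10, h11, h12, h13, h14, h15,
    beq_eq_false_iff_ne.mpr (Ne.symm h0), beq_eq_false_iff_ne.mpr (Ne.symm h1),
    beq_eq_false_iff_ne.mpr (Ne.symm h2), beq_eq_false_iff_ne.mpr (Ne.symm h3),
    beq_eq_false_iff_ne.mpr (Ne.symm h4), beq_eq_false_iff_ne.mpr (Ne.symm h5),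
    beq_eq_false_iff_ne.mpr (Ne.symm h6), beq_eq_false_iff_ne.mpr (Ne.symm h7),
    beq_eq_false_iff_ne.mpr (Ne.symm h8), beq_eq_false_iff_ne.mpr (Ne.symm h9),
    beq_eq_false_iff_ne.mpr (Ne.symm h10), beq_eq_false_iff_ne.mpr (Ne.symm h11),
    beq_eq_false_iff_ne.mpr (Ne.symm h12), beq_eq_false_iff_ne.mpr (Ne.symm h13),
    beq_eq_false_iff_ne.mpr (Ne.symm h14), beq_eq_false_iff_ne.mpr (Ne.symm h15)]

theorem goA_not_amp (c : Char) (rest color : List Char) (h : c ≠ '&') :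
    goA (c :: rest) color = mkSpan color c ++ goA rest color := by
  rcases rest with _ | ⟨c2, rest2⟩ <;> simp [goA, h]

-- the fold invariant: B's state machine, finished, produces acc ++ (A's scan of the rest),
-- in both states (pending = false: nothing buffered; pending = true: a '&' just read).
theorem foldB_invariant (l : List Char) :
    (∀ acc color, finishB (l.foldl stepB (acc, color, false)) = acc ++ goA l color)
  ∧ (∀ acc color, finishB (l.foldl stepB (acc, color, true)) = acc ++ goA ('&' :: l) color) := by
  induction l with
  | nil =>
    constructor
    · intro acc color; simp [finishB, goA]
    · intro acc color; simp [finishB, goA]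
  | cons ch rest ih =>
    obtain ⟨ihf, iht⟩ := ih
    constructor
    · intro acc color
      by_cases hch : ch = '&'
      · subst hch
        simp only [List.foldl_cons, stepB, if_neg (Bool.false_ne_true), if_true]
        exact iht acc color
      · simp only [List.foldl_cons, stepB, if_neg (Bool.false_ne_true), if_neg hch]
        rw [ihf (acc ++ mkSpan color ch) color, goA_not_amp ch rest color hch, List.append_assoc]
    · intro acc color
      by_cases hhex : hexChars.contains ch = true
      · simp only [List.foldl_cons, stepB, if_pos trivial, if_pos hhex]
        rw [ihf acc (colorOf ch)]
        have hmem : ch ∈ hexChars := by simpa [List.contains_eq_mem] using hhex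
        have : goA ('&' :: ch :: rest) color = goA rest (colorOf ch) := by
          simp [goA, mcGet_amp, hmem]
        rw [this]
      · have hnone : mcColors.get? ['&', ch] = none := by rw [mcGet_amp, if_neg hhex]
        by_cases hch : ch = '&'
        · subst hch
          simp only [List.foldl_cons, stepB, if_pos trivial, if_neg hhex]
          rw [iht (acc ++ mkSpan color '&') color]
          have : goA ('&' :: '&' :: rest) color = mkSpan color '&' ++ goA ('&' :: rest) color := by
            simp [goA, hnone]
          rw [this, List.append_assoc]
        · simp only [List.foldl_cons, stepB, if_pos trivial, if_neg hhex, if_neg hch]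
          rw [ihf (acc ++ mkSpan color '&' ++ mkSpan color ch) color]
          have : goA ('&' :: ch :: rest) color
              = mkSpan color '&' ++ (mkSpan color ch ++ goA rest color) := by
            simp [goA, hnone, goA_not_amp ch rest color hch]
          rw [this, List.append_assoc, List.append_assoc]

-- ===== VERDICT (by name: the statement is the Claim_ definition above) =====
theorem mc_to_html_spec : Claim_equal_mc_to_html := by
  intro text _
  unfold Spec_mc_to_html mc_to_html mc_to_html_alt
  rw [(foldB_invariant text.toList).1 [] "#FFFFFF".toList]
  rfl
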